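-- pv_equiv track=rewrite | github.com/ajjswift/mission-encodeable | level-7/caeserCipherCracker.py | decipher_word
-- ===== SOURCE A (Python) =====
-- def decipher_word(word):
--     word = word.upper()
--     shifts = []
--
--     # Store the shifted versions of the word with corresponding shift values
--     for i in range(-13, 14):  # Shift range from -13 to +13
--         shifted_word = []
--         for letter in word:
--             if 'A' <= letter <= 'Z':  # Only shift alphabetic characters
--                 new_char = chr((ord(letter) - 65 + i) % 26 + 65)
--                 shifted_word.append(new_char)
--             else:
--                 shifted_word.append(letter)
--         shifts.append((i, ''.join(shifted_word)))
--
--     return shifts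
-- ===== SOURCE B (Python) =====
-- def decipher_word(word):
--     word = word.upper()
--     upper = ''.join(map(chr, range(65, 91)))
--     shifts = []
--     for i in range(-13, 14):
--         k = i % 26
--         table = str.maketrans(upper, upper[k:] + upper[:k])
--         shifts.append((i, word.translate(table)))
--     return shifts
-- ===== Notes on version B (the rewrite author's own statement) =====
-- stated objective: faster
-- what changed: B precomputes one translation table (str.maketrans of the alphabet against its rotation by i%26) per shift and applies it with str.translate in one pass, instead of per-character ord/chr modular arithmetic inside a nested Python loop.
import Mathlib
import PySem

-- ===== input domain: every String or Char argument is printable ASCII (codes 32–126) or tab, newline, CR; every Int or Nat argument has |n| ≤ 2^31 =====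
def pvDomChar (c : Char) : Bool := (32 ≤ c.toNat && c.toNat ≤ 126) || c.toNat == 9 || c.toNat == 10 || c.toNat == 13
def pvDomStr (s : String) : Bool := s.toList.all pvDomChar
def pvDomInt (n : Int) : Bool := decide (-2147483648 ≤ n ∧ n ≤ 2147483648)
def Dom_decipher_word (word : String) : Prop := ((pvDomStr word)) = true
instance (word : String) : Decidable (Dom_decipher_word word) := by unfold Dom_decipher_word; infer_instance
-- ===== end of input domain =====

-- B builds one maketrans-style translation table per shift (rotated alphabet) and translates the
-- whole word through it, instead of A's per-character ord/chr modular arithmetic (idiomatic rewrite).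

-- ===== PORT A =====
def decipher_word (word : String) : List (Int × String) :=
  let w := PySem.Str.upper word
  (PySem.List.pyRange (-13) 14 1).foldl (fun shifts i =>
    let shifted_word := w.toList.foldl (fun acc letter =>
      if 'A' ≤ letter ∧ letter ≤ 'Z' then
        acc ++ [Char.ofNat ((PySem.Int.mod ((letter.toNat : Int) - 65 + i) 26 + 65).toNat)]
      else
        acc ++ [letter]) []
    shifts ++ [(i, String.ofList shifted_word)]) []

-- ===== PORT B =====
-- str.maketrans(xs, ys): a dict mapping each char of xs to the corresponding char of ys
def pvMakeTrans (xs ys : List Char) : PySem.Dict Char Char :=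
  (xs.zip ys).foldl (fun d p => d.insert p.1 p.2) (PySem.Dict.mk [])

-- s.translate(table): chars absent from the table pass through unchanged
def pvTranslate (table : PySem.Dict Char Char) (s : List Char) : List Char :=
  s.map (fun c => (table.get? c).getD c)

def decipher_word_alt (word : String) : List (Int × String) :=
  let w := PySem.Str.upper word
  let upper := (PySem.List.pyRange 65 91 1).map (fun n => Char.ofNat n.toNat)
  (PySem.List.pyRange (-13) 14 1).foldl (fun shifts i =>
    let k := PySem.Int.mod i 26
    let table := pvMakeTrans upper
      (PySem.List.slice upper (some k) none ++ PySem.List.slice upper none (some k))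
    shifts ++ [(i, String.ofList (pvTranslate table w.toList))]) []

-- ===== PRECONDITION & SPEC =====
def Spec_decipher_word (word : String) (out : List (Int × String)) : Prop := out = decipher_word_alt word
instance (word : String) (out : List (Int × String)) : Decidable (Spec_decipher_word word out) := by unfold Spec_decipher_word; infer_instance

-- ===== CLAIM (what is proved, stated in full; the proofs are below) =====
def Claim_equal_decipher_word : Prop := ∀ (word : String), Dom_decipher_word word → Spec_decipher_word word (decipher_word word)

-- ===== LEMMAS AND PROOFS =====

-- A's per-character shift and B's table lookup, as standalone functions (proof-side only)
def pvShiftA (i : Int) (letter : Char) : Char :=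
  if 'A' ≤ letter ∧ letter ≤ 'Z' then
    Char.ofNat ((PySem.Int.mod ((letter.toNat : Int) - 65 + i) 26 + 65).toNat)
  else letter

def pvShiftB (i : Int) (c : Char) : Char :=
  let upper := (PySem.List.pyRange 65 91 1).map (fun n => Char.ofNat n.toNat)
  let k := PySem.Int.mod i 26
  ((pvMakeTrans upper
      (PySem.List.slice upper (some k) none ++ PySem.List.slice upper none (some k))).get? c).getD c

-- the two per-character maps agree on every ASCII char (code < 128), for every shift in range
lemma pvCharCheck :
    ((PySem.List.pyRange (-13) 14 1).all (fun i =>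
      (List.range 128).all (fun n => pvShiftA i (Char.ofNat n) == pvShiftB i (Char.ofNat n)))) = true := by
  decide

lemma pvShift_eq (i : Int) (hi : i ∈ PySem.List.pyRange (-13) 14 1)
    (c : Char) (hc : c.toNat < 128) : pvShiftA i c = pvShiftB i c := by
  have h := pvCharCheck
  rw [List.all_eq_true] at h
  have h2 := h i hi
  rw [List.all_eq_true] at h2
  have h3 := h2 c.toNat (List.mem_range.mpr hc)
  rw [Char.ofNat_toNat c] at h3
  exact eq_of_beq h3
  
lemma pvCharToNatOfNat (n : Nat) (h : n < 128) : (Char.ofNat n).toNat = n := by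
  have hv : Nat.isValidChar n := Or.inl (by omega)
  simp only [Char.ofNat, hv, dif_pos, Char.ofNatAux, Char.toNat]
  simp

lemma pvUpperChar_lt (c : Char) (hc : c.toNat < 128) : (PySem.Chars.upperChar c).toNat < 128 := by
  simp only [PySem.Chars.upperChar, PySem.Chars.islower]
  split
  · have := pvCharToNatOfNat (c.toNat - 32) (by omega); omega
  · omega

-- ===== VERDICT (by name: the statement is the Claim_ definition above) =====
theorem decipher_word_spec : Claim_equal_decipher_word := by
  intro word hdom
  unfold Spec_decipher_word decipher_word decipher_word_alt
  simp only
  rw [PySem.List.foldl_append_singleton_eq_map, PySem.List.foldl_append_singleton_eq_map]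
  simp only [List.nil_append]
  apply List.map_congr_left
  intro i hi
  refine Prod.ext rfl ?_
  simp only
  congr 1
  have hA : (PySem.Str.upper word).toList.foldl (fun acc letter =>
      if 'A' ≤ letter ∧ letter ≤ 'Z' then
        acc ++ [Char.ofNat ((PySem.Int.mod ((letter.toNat : Int) - 65 + i) 26 + 65).toNat)]
      else acc ++ [letter]) [] = (PySem.Str.upper word).toList.map (pvShiftA i) := by
    rw [show (fun (acc : List Char) letter =>
      if 'A' ≤ letter ∧ letter ≤ 'Z' then
        acc ++ [Char.ofNat ((PySem.Int.mod ((letter.toNat : Int) - 65 + i) 26 + 65).toNat)]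
      else acc ++ [letter]) = (fun acc letter => acc ++ [pvShiftA i letter]) from ?_]
    · rw [PySem.List.foldl_append_singleton_eq_map]; simp
    · funext acc letter
      unfold pvShiftA
      split <;> rfl
  rw [hA]
  show _ = pvTranslate _ _
  unfold pvTranslate
  apply List.map_congr_left
  intro c hc
  have hlt : c.toNat < 128 := by
    have := hdom
    unfold Dom_decipher_word pvDomStr at this
    rw [PySem.Str.toList_upper] at hc
    have hmem : ∃ c0 ∈ word.toList, c = PySem.Chars.upperChar c0 := by
      simp [PySem.Chars.upper] at hc
      obtain ⟨c0, h0, h1⟩ := hc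
      exact ⟨c0, h0, h1.symm⟩
    obtain ⟨c0, h0, h1⟩ := hmem
    rw [List.all_eq_true] at this
    have := this c0 h0
    unfold pvDomChar at this
    subst h1
    apply pvUpperChar_lt
    simp at this
    omega
  exact pvShift_eq i hi c hlt
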